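-- pv_equiv track=rewrite | github.com/AllenZhaoHang/Allen_Repository | CS 5001 Foundations of Computer Science(Python)/Coding Practice Module 7/in_english.py | in_english
-- ===== SOURCE A (Python) =====
-- def in_english(num):
--     '''integer value'''
--     digit_in_english = {
--         '0': 'zero',
--         '1': 'one',
--         '2': 'two',
--         '3': 'three',
--         '4': 'four',
--         '5': 'five',
--         '6': 'six',
--         '7': 'seven',
--         '8': 'eight',
--         '9': 'nine'
--     }
--     if num < 10:
--         return digit_in_english[str(num)]
--     last_digit = num % 10
--     rest_of_num = num // 10
--     rest_of_eng = in_english(rest_of_num)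
--     return rest_of_eng + ' ' + digit_in_english[str(last_digit)]
-- ===== SOURCE B (Python) =====
-- def in_english(num):
--     '''integer value'''
--     digit_in_english = {
--         '0': 'zero',
--         '1': 'one',
--         '2': 'two',
--         '3': 'three',
--         '4': 'four',
--         '5': 'five',
--         '6': 'six',
--         '7': 'seven',
--         '8': 'eight',
--         '9': 'nine'
--     }
--     return ' '.join(digit_in_english[c] for c in str(num))
-- ===== Notes on version B (the rewrite author's own statement) =====
-- stated objective: idiomatic
-- what changed: Replaces the reverse recursive peel-and-concatenate over num%10 and num//10 by a single left-to-right pass: compute str(num) once and ' '.join the word for each digit character.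
import Mathlib
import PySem

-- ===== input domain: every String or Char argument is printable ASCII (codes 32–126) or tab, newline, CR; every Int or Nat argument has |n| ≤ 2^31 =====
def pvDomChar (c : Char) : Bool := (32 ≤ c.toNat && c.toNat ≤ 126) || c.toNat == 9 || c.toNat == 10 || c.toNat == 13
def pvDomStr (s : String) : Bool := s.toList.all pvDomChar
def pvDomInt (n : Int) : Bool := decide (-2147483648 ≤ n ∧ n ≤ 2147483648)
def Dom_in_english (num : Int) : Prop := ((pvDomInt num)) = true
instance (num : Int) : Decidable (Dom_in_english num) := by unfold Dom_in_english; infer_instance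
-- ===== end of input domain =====

-- B replaces A's reverse recursion over num%10 / num//10 by one pass over str(num) joined with spaces (idiomatic; return value only).

-- ===== PORT A =====
def pvDigitEnglish : PySem.Dict String String :=
  PySem.Dict.ofList [("0","zero"),("1","one"),("2","two"),("3","three"),("4","four"),
    ("5","five"),("6","six"),("7","seven"),("8","eight"),("9","nine")]

-- dict lookup digit_in_english[str(·)]: under Pre_ the key is always present, so the getD default "" is never reached
def in_english (num : Int) : String :=
  if num < 10 then pvDigitEnglish.getD (PySem.Int.toStr num) ""
  else
    let last_digit := PySem.Int.mod num 10
    let rest_of_num := PySem.Int.floordiv num 10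
    let rest_of_eng := in_english rest_of_num
    rest_of_eng ++ " " ++ pvDigitEnglish.getD (PySem.Int.toStr last_digit) ""
termination_by num.toNat
decreasing_by
  simp only [PySem.Int.floordiv_eq_ediv_of_pos (by norm_num : (0:Int) < 10)]
  omega

-- ===== PORT B =====
def pvDigitWord : PySem.Dict Char String :=
  PySem.Dict.ofList [('0',"zero"),('1',"one"),('2',"two"),('3',"three"),('4',"four"),
    ('5',"five"),('6',"six"),('7',"seven"),('8',"eight"),('9',"nine")]

def in_english_alt (num : Int) : String :=
  PySem.Str.join " " ((PySem.Int.toChars num).map (fun c => pvDigitWord.getD c ""))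

-- ===== PRECONDITION & SPEC =====
-- Pre_ excludes num < 0, where str(num) starts with '-' and both A and B raise KeyError.
def Pre_in_english (num : Int) : Prop := 0 ≤ num
instance (num : Int) : Decidable (Pre_in_english num) := by unfold Pre_in_english; infer_instance
def pvWitness_in_english : Int := 907

def Spec_in_english (num : Int) (out : String) : Prop := out = in_english_alt num
instance (num : Int) (out : String) : Decidable (Spec_in_english num out) := by unfold Spec_in_english; infer_instance

-- ===== CLAIM (what is proved, stated in full; the proofs are below) =====
def Claim_equal_in_english : Prop := ∀ (num : Int), Dom_in_english num → Pre_in_english num → Spec_in_english num (in_english num)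

-- ===== LEMMAS AND PROOFS =====

lemma pv_chars_join_append_singleton (sep w : List Char) :
    ∀ (l : List (List Char)), l ≠ [] →
      PySem.Chars.join sep (l ++ [w]) = PySem.Chars.join sep l ++ sep ++ w := by
  intro l
  induction l with
  | nil => intro h; exact absurd rfl h
  | cons a t ih =>
    intro _
    cases t with
    | nil => simp [PySem.Chars.join_cons_cons, PySem.Chars.join_singleton]
    | cons b r =>
      have h2 := ih (by simp)
      simp only [List.cons_append, PySem.Chars.join_cons_cons] at h2 ⊢
      rw [h2]
      simp [List.append_assoc]

lemma pv_toChars_of_nonneg (num : Int) (h : 0 ≤ num) :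
    PySem.Int.toChars num = Nat.toDigits 10 num.toNat := by
  simp [PySem.Int.toChars, not_lt.mpr h]

-- the last digit's word: string-keyed lookup in A and char-keyed lookup in B agree on each digit
set_option maxHeartbeats 1000000 in
lemma pv_word_eq (k : Nat) (hk : k < 10) :
    pvDigitEnglish.getD (PySem.Int.toStr (k : Int)) ""
      = pvDigitWord.getD (Nat.digitChar k) "" := by
  interval_cases k <;> decide

set_option maxHeartbeats 1000000 in
lemma pv_base_case (num : Int) (h0 : 0 ≤ num) (h10 : num < 10) :
    in_english num = in_english_alt num := by
  interval_cases num <;> (rw [in_english]; decide)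

lemma pv_alt_step (num : Int) (h : 10 ≤ num) :
    in_english_alt num
      = in_english_alt (num / 10) ++ " " ++ pvDigitEnglish.getD (PySem.Int.toStr (num % 10)) "" := by
  have h0 : 0 ≤ num := by omega
  have hq0 : 0 ≤ num / 10 := by omega
  have hq : (num / 10).toNat = num.toNat / 10 := by omega
  have hk : num % 10 = ((num.toNat % 10 : Nat) : Int) := by omega
  have hge : 10 ≤ num.toNat := by omega
  apply String.toList_inj.mp
  rw [in_english_alt, in_english_alt,
      pv_toChars_of_nonneg num h0, pv_toChars_of_nonneg _ hq0, hq,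
      Nat.toDigits_of_base_le (by norm_num) hge, List.map_append]
  rw [hk, pv_word_eq _ (Nat.mod_lt _ (by norm_num))]
  simp only [String.toList_append, PySem.Str.toList_join, List.map_append, List.map_map,
    List.map_cons, List.map_nil]
  rw [pv_chars_join_append_singleton]
  case a =>
    have hl := @Nat.length_toDigits_pos 10 (num.toNat / 10)
    intro hnil
    simp only [List.map_eq_nil_iff] at hnil
    rw [hnil] at hl
    simp at hl

lemma pv_main : ∀ (n : Nat) (num : Int), 0 ≤ num → num.toNat = n →
    in_english num = in_english_alt num := by
  intro n
  induction n using Nat.strong_induction_on with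
  | _ n ih =>
    intro num h0 hn
    by_cases h10 : num < 10
    · exact pv_base_case num h0 h10
    · replace h10 : 10 ≤ num := not_lt.mp h10
      have hfd : PySem.Int.floordiv num 10 = num / 10 :=
        PySem.Int.floordiv_eq_ediv_of_pos (by norm_num)
      have hmd : PySem.Int.mod num 10 = num % 10 :=
        PySem.Int.mod_eq_emod_of_pos (by norm_num)
      have hlt : (num / 10).toNat < n := by omega
      have ihr := ih _ hlt (num / 10) (by omega) rfl
      rw [in_english]
      rw [if_neg (not_lt.mpr h10)]
      simp only [hfd, hmd, ihr]
      exact (pv_alt_step num h10).symm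

-- ===== VERDICT (by name: the statement is the Claim_ definition above) =====
theorem in_english_spec : Claim_equal_in_english := by
  intro num _ hpre
  exact pv_main num.toNat num hpre rfl
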